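-- pv_equiv track=rewrite | github.com/eurstudent/Computer-Science-Paper | main_SIM_GRIDSEARCH.py | getBandAndRows
-- ===== SOURCE A (Python) =====
-- import math
--
-- def getBandAndRows(band, lengthInputMatrix):
--     matchNotFound = True
--     while (matchNotFound):
--         r = range(math.ceil(lengthInputMatrix / band), 0, -1)
--         for i in range(len(r)):
--             if r[i] * band == lengthInputMatrix:
--                 row = r[i]
--                 matchNotFound = False
--         band = band - 1
--     return band + 1, row
-- ===== SOURCE B (Python) =====
-- def getBandAndRows(band, lengthInputMatrix):
--     # Search over quotients (row counts) upward instead of over bands downward: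
--     # the smallest quotient q >= ceil(L/band) that divides L pairs with the
--     # largest band <= the initial band that divides L.
--     q = max(1, -(-lengthInputMatrix // band))
--     while lengthInputMatrix % q != 0:
--         q += 1
--     return lengthInputMatrix // q, q
-- ===== Notes on version B (the rewrite author's own statement) =====
-- stated objective: faster
-- what changed: Instead of decrementing the band and scanning a whole countdown range of candidate row counts at each band, B searches upward over row counts (quotients) for the smallest q >= ceil(L/band) dividing L and returns (L//q, q).
-- outside the precondition, e.g. on getBandAndRows(-4, -6): A returns (-6, 1), B returns (-3, 2)
import Mathlib
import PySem

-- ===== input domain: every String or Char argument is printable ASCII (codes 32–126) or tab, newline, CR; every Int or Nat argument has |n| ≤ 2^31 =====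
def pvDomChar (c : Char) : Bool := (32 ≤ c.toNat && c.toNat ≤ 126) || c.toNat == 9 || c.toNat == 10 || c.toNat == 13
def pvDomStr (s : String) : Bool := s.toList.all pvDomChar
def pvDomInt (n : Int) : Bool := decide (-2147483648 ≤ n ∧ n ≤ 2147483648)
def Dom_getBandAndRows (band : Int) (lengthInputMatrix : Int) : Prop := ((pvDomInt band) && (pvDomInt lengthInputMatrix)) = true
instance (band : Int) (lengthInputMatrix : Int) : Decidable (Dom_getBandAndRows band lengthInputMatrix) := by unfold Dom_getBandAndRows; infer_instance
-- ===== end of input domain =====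

-- B searches upward over row counts (quotients) instead of A's downward scan over bands
-- with a full countdown-range scan per band; same return value on Pre_ (band ≥ 1, length ≥ 1).

-- ===== PORT A =====
-- One pass of the while-body: the 'for i in range(len(r)): if r[i]*band == L: row = r[i]; matchNotFound = False'
-- scan, folded over r = range(ceil(L/band), 0, -1) with the mutable state (matchNotFound, row).
-- math.ceil(L / band) is ported as -((-L) // band), exact for the 1 ≤ band, 1 ≤ L inputs Pre_ admits
-- (the float quotient of ints with |·| ≤ 2^31 never rounds across an integer there).
def getBandAndRowsGo (L : Int) (band : Int) (row : Int) (fuel : Nat) : Int × Int :=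
  match fuel with
  | 0 => (band, row)  -- out of fuel: unreachable for inputs satisfying Pre_ (A diverges/raises otherwise)
  | f + 1 =>
    let c := -(PySem.Int.floordiv (-L) band)
    let st := (PySem.List.pyRange c 0 (-1)).foldl
      (fun (p : Bool × Int) x => if x * band = L then (false, x) else p) (true, row)
    let band' := band - 1
    if st.1 then getBandAndRowsGo L band' st.2 f else (band' + 1, st.2)

def getBandAndRows (band : Int) (lengthInputMatrix : Int) : Int × Int :=
  -- Python's 'row' starts unbound; it is only returned after being assigned, so the initial 0 is never returned on Pre_.
  -- The fuel bounds the number of while-iterations: band.toNat on Pre_ (band counts down and band = 1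
  -- always matches); the extra (band - L) term also covers the negative-band/negative-length inputs
  -- outside Pre_ on which the Python loop still terminates. Where Python diverges/raises, fuel runs out.
  getBandAndRowsGo lengthInputMatrix band 0 (band.toNat + (band - lengthInputMatrix).toNat + 1)

-- ===== PORT B =====
def getBandAndRowsAltGo (L : Int) (q : Int) (fuel : Nat) : Int × Int :=
  match fuel with
  | 0 => (0, 0)  -- out of fuel: unreachable, fuel (L - q).toNat + 1 suffices on Pre_
  | f + 1 =>
    if PySem.Int.mod L q ≠ 0 then getBandAndRowsAltGo L (q + 1) f
    else (PySem.Int.floordiv L q, q)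

def getBandAndRows_alt (band : Int) (lengthInputMatrix : Int) : Int × Int :=
  let q := max 1 (-(PySem.Int.floordiv (-lengthInputMatrix) band))
  getBandAndRowsAltGo lengthInputMatrix q ((lengthInputMatrix - q).toNat + 1)

-- ===== PRECONDITION & SPEC =====
-- Pre_ restricts to the function's natural domain (positive band and positive matrix length, as in the
-- calling code): outside it A raises ZeroDivisionError or diverges on most inputs, and on the remaining
-- negative-band/negative-length corner (e.g. (-4, -6)) A's sign-flipped factorization is an accident of
-- the scan that B does not reproduce.
def Pre_getBandAndRows (band : Int) (lengthInputMatrix : Int) : Prop :=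
  1 ≤ band ∧ 1 ≤ lengthInputMatrix
instance (band : Int) (lengthInputMatrix : Int) : Decidable (Pre_getBandAndRows band lengthInputMatrix) := by
  unfold Pre_getBandAndRows; infer_instance

def pvWitness_getBandAndRows : Int × Int := (6, 15)

def Spec_getBandAndRows (band : Int) (lengthInputMatrix : Int) (out : Int × Int) : Prop := out = getBandAndRows_alt band lengthInputMatrix
instance (band : Int) (lengthInputMatrix : Int) (out : Int × Int) : Decidable (Spec_getBandAndRows band lengthInputMatrix out) := by unfold Spec_getBandAndRows; infer_instance

-- ===== CLAIM (what is proved, stated in full; the proofs are below) =====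
def Claim_equal_getBandAndRows : Prop := ∀ (band : Int) (lengthInputMatrix : Int), Dom_getBandAndRows band lengthInputMatrix → Pre_getBandAndRows band lengthInputMatrix → Spec_getBandAndRows band lengthInputMatrix (getBandAndRows band lengthInputMatrix)

-- ===== LEMMAS AND PROOFS =====

-- The scan function of A's inner loop.
lemma scan_no_match (L band : Int) (l : List Int) (p : Bool × Int)
    (h : ∀ x ∈ l, x * band ≠ L) :
    l.foldl (fun (p : Bool × Int) x => if x * band = L then (false, x) else p) p = p := by
  induction l generalizing p with
  | nil => rfl
  | cons a t ih =>
    simp only [List.foldl_cons]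
    rw [if_neg (h a (by simp))]
    exact ih _ (fun x hx => h x (by simp [hx]))

lemma scan_keeps (L band x0 : Int) (l : List Int)
    (hu : ∀ x ∈ l, x * band = L → x = x0) :
    l.foldl (fun (p : Bool × Int) x => if x * band = L then (false, x) else p) (false, x0) = (false, x0) := by
  induction l with
  | nil => rfl
  | cons a t ih =>
    simp only [List.foldl_cons]
    by_cases h : a * band = L
    · rw [if_pos h, hu a (by simp) h]
      exact ih (fun x hx => hu x (by simp [hx]))
    · rw [if_neg h]
      exact ih (fun x hx => hu x (by simp [hx]))

lemma scan_found (L band x0 : Int) (hb : band ≠ 0) (hx0 : x0 * band = L) (l : List Int) :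
    ∀ (p : Bool × Int), x0 ∈ l →
    l.foldl (fun (p : Bool × Int) x => if x * band = L then (false, x) else p) p = (false, x0) := by
  have uniq : ∀ x : Int, x * band = L → x = x0 := by
    intro x hx
    exact mul_right_cancel₀ hb (hx.trans hx0.symm)
  induction l with
  | nil => intro p hmem; simp at hmem
  | cons a t ih =>
    intro p hmem
    simp only [List.foldl_cons]
    by_cases h : a * band = L
    · rw [if_pos h, uniq a h]
      exact scan_keeps L band x0 t (fun x _ hx => uniq x hx)
    · rw [if_neg h]
      have hmt : x0 ∈ t := by
        rcases List.mem_cons.mp hmem with rfl | ht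
        · exact absurd hx0 h
        · exact ht
      exact ih _ hmt

-- ceiling division facts
lemma ceil_eq_of_dvd (L band : Int) (hb : 0 < band) (h : band ∣ L) :
    -(PySem.Int.floordiv (-L) band) = L / band := by
  rw [PySem.Int.neg_floordiv_neg_eq_iff_of_pos hb]
  constructor
  · have : L / band * band = L := Int.ediv_mul_cancel h
    nlinarith
  · rw [Int.ediv_mul_cancel h]

lemma ceil_bracket (L band : Int) (hb : 0 < band) :
    (-(PySem.Int.floordiv (-L) band) - 1) * band < L ∧ L ≤ -(PySem.Int.floordiv (-L) band) * band :=
  (PySem.Int.neg_floordiv_neg_eq_iff_of_pos hb).mp rfl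

-- A's loop returns (b, L / b) where b is the largest divisor of L with b ≤ band and b ≤ L.
lemma aLoop_spec (L : Int) (hL : 1 ≤ L) :
    ∀ (fuel : Nat) (band row : Int), 1 ≤ band → band.toNat ≤ fuel →
    ∃ b : Int, getBandAndRowsGo L band row fuel = (b, L / b) ∧ 1 ≤ b ∧ b ≤ band ∧ b ∣ L ∧ b ≤ L ∧
      (∀ b' : Int, 1 ≤ b' → b' ≤ band → b' ∣ L → b' ≤ L → b' ≤ b) := by
  intro fuel
  induction fuel with
  | zero => intro band row hb hf; omega
  | succ f ih =>
    intro band row hb hf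
    by_cases h : band ∣ L ∧ band ≤ L
    · refine ⟨band, ?_, hb, le_refl _, h.1, h.2, fun b' _ hb' _ _ => hb'⟩
      have hq1 : 1 ≤ L / band := by
        have := Int.ediv_mul_cancel h.1
        nlinarith [Int.ediv_mul_cancel h.1]
      have hmem : L / band ∈ PySem.List.pyRange (-(PySem.Int.floordiv (-L) band)) 0 (-1) := by
        rw [PySem.List.mem_pyRange_neg_one, ceil_eq_of_dvd L band (by omega) h.1]
        omega
      have hx0 : L / band * band = L := Int.ediv_mul_cancel h.1
      unfold getBandAndRowsGo
      simp only
      rw [scan_found L band (L / band) (by omega) hx0 _ _ hmem]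
      simp only [if_neg (by simp : ¬ ((false, L / band).1 = true))]
      ring_nf
    · -- band does not qualify: the scan finds nothing, recurse with band - 1
      have hband2 : 2 ≤ band := by
        rcases lt_or_ge 1 band with h1 | h1
        · omega
        · exfalso; apply h
          have : band = 1 := by omega
          subst this; exact ⟨one_dvd L, hL⟩
      have hnone : ∀ x ∈ PySem.List.pyRange (-(PySem.Int.floordiv (-L) band)) 0 (-1), x * band ≠ L := by
        intro x hx hxe
        apply h
        refine ⟨⟨x, by rw [← hxe]; ring⟩, ?_⟩
        rw [PySem.List.mem_pyRange_neg_one] at hx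
        nlinarith
      unfold getBandAndRowsGo
      simp only
      rw [scan_no_match L band _ _ hnone]
      simp only
      obtain ⟨b, heq, h1, h2, h3, h4, hmax⟩ := ih (band - 1) row (by omega) (by omega)
      refine ⟨b, heq, h1, by omega, h3, h4, ?_⟩
      intro b' hb'1 hb'2 hb'3 hb'4
      apply hmax b' hb'1 _ hb'3 hb'4
      rcases lt_or_ge b' band with hlt | hge
      · omega
      · exfalso; exact h ⟨by rwa [le_antisymm hb'2 hge] at hb'3, by omega⟩

-- B's loop returns (L / q, q) where q is the smallest divisor of L with q ≥ the start value.
lemma bLoop_spec (L : Int) (hL : 1 ≤ L) :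
    ∀ (fuel : Nat) (q : Int), 1 ≤ q → q ≤ L → (L - q).toNat < fuel →
    ∃ qm : Int, getBandAndRowsAltGo L q fuel = (L / qm, qm) ∧ q ≤ qm ∧ qm ∣ L ∧ qm ≤ L ∧
      (∀ q' : Int, q ≤ q' → q' ∣ L → 1 ≤ q' → qm ≤ q') := by
  intro fuel
  induction fuel with
  | zero => intro q h1 h2 hf; omega
  | succ f ih =>
    intro q h1 h2 hf
    by_cases hdvd : q ∣ L
    · refine ⟨q, ?_, le_refl _, hdvd, h2, fun q' hq' _ _ => hq'⟩
      unfold getBandAndRowsAltGo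
      rw [if_neg (by simp [(PySem.Int.mod_eq_zero_iff_dvd L q).mpr hdvd]),
        PySem.Int.floordiv_eq_ediv_of_pos (by omega : (0:Int) < q)]
    · have hne : q ≠ L := fun he => hdvd (he ▸ dvd_refl L)
      unfold getBandAndRowsAltGo
      rw [if_pos (by simpa [PySem.Int.mod_eq_zero_iff_dvd L q] using hdvd)]
      obtain ⟨qm, heq, hge, hd, hle, hmin⟩ := ih (q + 1) (by omega) (by omega) (by omega)
      refine ⟨qm, heq, by omega, hd, hle, ?_⟩
      intro q' hq'1 hq'2 hq'3
      apply hmin q' _ hq'2 hq'3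
      rcases lt_or_ge q q' with hlt | hge'
      · omega
      · exfalso; exact hdvd (le_antisymm hge' hq'1 ▸ hq'2)

-- ===== VERDICT (by name: the statement is the Claim_ definition above) =====
theorem getBandAndRows_spec : Claim_equal_getBandAndRows := by
  intro band L _ hpre
  obtain ⟨hb, hL⟩ := hpre
  unfold Spec_getBandAndRows getBandAndRows getBandAndRows_alt
  set c : Int := -(PySem.Int.floordiv (-L) band) with hc
  obtain ⟨hcl, hcu⟩ := ceil_bracket L band (by omega)
  have hcL : c ≤ L := by nlinarith
  set q0 : Int := max 1 c with hq0
  have hq01 : 1 ≤ q0 := le_max_left _ _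
  have hq0L : q0 ≤ L := by
    rcases max_choice 1 c with h | h <;> omega
  obtain ⟨b, hAeq, hb1, hbband, hbdvd, hbL, hbmax⟩ :=
    aLoop_spec L hL (band.toNat + (band - L).toNat + 1) band 0 hb (by omega)
  obtain ⟨qm, hBeq, hqmge, hqmdvd, hqmL, hqmmin⟩ :=
    bLoop_spec L hL ((L - q0).toNat + 1) q0 hq01 hq0L (by omega)
  rw [hAeq, hBeq]
  -- L / qm is a candidate band for A's maximality
  have hqm1 : 1 ≤ qm := le_trans hq01 hqmge
  have hqmmul : L / qm * qm = L := Int.ediv_mul_cancel hqmdvd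
  have hcand1 : 1 ≤ L / qm := by nlinarith
  have hcandband : L / qm ≤ band := by nlinarith [le_trans (le_max_right 1 c) hqmge]
  have hcandle : L / qm ≤ b :=
    hbmax (L / qm) hcand1 hcandband (⟨qm, hqmmul.symm⟩) (by nlinarith)
  -- L / b is a candidate quotient for B's minimality
  have hbmul : L / b * b = L := Int.ediv_mul_cancel hbdvd
  have hLb1 : 1 ≤ L / b := by nlinarith
  have hLbc : c ≤ L / b := by nlinarith
  have hLbq0 : q0 ≤ L / b := by
    rcases max_choice 1 c with h | h <;> omega
  have hqmle : qm ≤ L / b := hqmmin (L / b) hLbq0 (⟨b, hbmul.symm⟩) hLb1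
  -- conclude b = L / qm and L / b = qm
  have hble : b ≤ L / qm := by nlinarith
  have hbeq : b = L / qm := le_antisymm hble hcandle
  have hLbeq : L / b = qm := by
    have hbne : b ≠ 0 := by omega
    have : L = b * qm := by rw [hbeq]; nlinarith
    rw [this, Int.mul_ediv_cancel_left _ hbne]
  rw [Prod.mk.injEq]
  exact ⟨hbeq, hLbeq⟩
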